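-- pv_equiv track=rewrite | github.com/enzococca/deep-search-ai | app/agents/image_agent.py | _determine_operation_type
-- ===== SOURCE A (Python) =====
-- from typing import Dict, List, Any, Optional
--
-- def _determine_operation_type(query: str, context: Optional[Dict[str, Any]]) -> str:
--     """Determina il tipo di operazione richiesta"""
--
--     # Se c'è un'immagine nel contesto
--     if context and context.get('image_path'):
--         if any(keyword in query.lower() for keyword in ['analizza', 'descrivi', 'cosa vedi']):
--             return 'analyze_image'
--         elif any(keyword in query.lower() for keyword in ['simili', 'trova immagini come']):
--             return 'search_by_image'
--         elif any(keyword in query.lower() for keyword in ['testo', 'ocr', 'leggi']):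
--             return 'extract_text'
--
--     # Ricerca per descrizione
--     if any(keyword in query.lower() for keyword in ['trova immagini', 'cerca foto', 'immagini di']):
--         return 'search_by_description'
--
--     return 'general_image_search'
-- ===== SOURCE B (Python) =====
-- from typing import Dict, List, Any, Optional
--
-- # keyword -> priority rank (0..3); ops indexed by rank
-- _KEYWORDS = [('analizza', 0), ('descrivi', 0), ('cosa vedi', 0),
--              ('simili', 1), ('trova immagini come', 1),
--              ('testo', 2), ('ocr', 2), ('leggi', 2),
--              ('trova immagini', 3), ('cerca foto', 3), ('immagini di', 3)]
-- _OPS = ['analyze_image', 'search_by_image', 'extract_text', 'search_by_description']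
--
-- def _determine_operation_type(query: str, context: Optional[Dict[str, Any]]) -> str:
--     """Flat keyword->rank table; one min-fold picks the lowest-ranked matching keyword."""
--     q = query.lower()
--     start = 0 if (context and context.get('image_path')) else 3
--     best = 4
--     for kw, pri in _KEYWORDS:
--         if start <= pri < best and kw in q:
--             best = pri
--     return _OPS[best] if best < 4 else 'general_image_search'
-- ===== Notes on version B (the rewrite author's own statement) =====
-- stated objective: alternative
-- what changed: Replaces the ordered if/elif keyword-group chain with a flat keyword-to-rank table scanned once by a min-fold (no per-group short-circuit): the lowest rank among all matching keywords, gated by a start rank when no image context, indexes into an operations array.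
import Mathlib
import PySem

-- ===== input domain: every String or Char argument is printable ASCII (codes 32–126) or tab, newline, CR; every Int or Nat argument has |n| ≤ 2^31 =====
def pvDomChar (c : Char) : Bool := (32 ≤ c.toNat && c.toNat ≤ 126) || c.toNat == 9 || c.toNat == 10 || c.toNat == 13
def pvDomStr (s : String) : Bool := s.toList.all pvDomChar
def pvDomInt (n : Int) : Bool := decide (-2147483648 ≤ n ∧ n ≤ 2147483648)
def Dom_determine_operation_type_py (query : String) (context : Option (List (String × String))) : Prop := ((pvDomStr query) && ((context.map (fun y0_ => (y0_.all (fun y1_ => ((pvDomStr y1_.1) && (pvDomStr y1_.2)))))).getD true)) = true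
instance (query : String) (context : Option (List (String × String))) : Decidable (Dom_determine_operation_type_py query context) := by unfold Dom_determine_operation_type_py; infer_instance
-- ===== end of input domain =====

-- B replaces A's ordered if/elif keyword-group chain by a flat keyword→rank table
-- and a single min-fold selecting the lowest-ranked matching keyword (objective: alternative).

-- ===== PORT A =====
-- 'context and context.get("image_path")' truthiness: dict non-empty and value a non-empty string
def pvCtxHasImage (context : Option (List (String × String))) : Bool :=
  match context with
  | none => false
  | some d => decide (d ≠ []) && decide (((PySem.Dict.mk d).get? "image_path").getD "" ≠ "")

def determine_operation_type_py (query : String) (context : Option (List (String × String))) : String :=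
  if pvCtxHasImage context &&
     (["analizza", "descrivi", "cosa vedi"].any fun k => PySem.Str.isIn k (PySem.Str.lower query)) then
    "analyze_image"
  else if pvCtxHasImage context &&
     (["simili", "trova immagini come"].any fun k => PySem.Str.isIn k (PySem.Str.lower query)) then
    "search_by_image"
  else if pvCtxHasImage context &&
     (["testo", "ocr", "leggi"].any fun k => PySem.Str.isIn k (PySem.Str.lower query)) then
    "extract_text"
  else if ["trova immagini", "cerca foto", "immagini di"].any
            fun k => PySem.Str.isIn k (PySem.Str.lower query) then
    "search_by_description"
  else
    "general_image_search"

-- ===== PORT B =====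
def pvKeywordTable : List (String × Nat) :=
  [("analizza", 0), ("descrivi", 0), ("cosa vedi", 0),
   ("simili", 1), ("trova immagini come", 1),
   ("testo", 2), ("ocr", 2), ("leggi", 2),
   ("trova immagini", 3), ("cerca foto", 3), ("immagini di", 3)]

def pvOps : List String :=
  ["analyze_image", "search_by_image", "extract_text", "search_by_description"]

def pvCtxTruthy (context : Option (List (String × String))) : Bool :=
  match context with
  | none => false
  | some d => decide (d ≠ []) && decide (((PySem.Dict.mk d).get? "image_path").getD "" ≠ "")

def determine_operation_type_py_alt (query : String) (context : Option (List (String × String))) : String :=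
  let q := PySem.Str.lower query
  let start : Nat := if pvCtxTruthy context then 0 else 3
  let best : Nat := pvKeywordTable.foldl
    (fun b kp => if start ≤ kp.2 && kp.2 < b && PySem.Str.isIn kp.1 q then kp.2 else b) 4
  if best < 4 then pvOps.getD best "" else "general_image_search"

-- ===== PRECONDITION & SPEC =====
def Spec_determine_operation_type_py (query : String) (context : Option (List (String × String))) (out : String) : Prop := out = determine_operation_type_py_alt query context
instance (query : String) (context : Option (List (String × String))) (out : String) : Decidable (Spec_determine_operation_type_py query context out) := by unfold Spec_determine_operation_type_py; infer_instance

-- ===== CLAIM (what is proved, stated in full; the proofs are below) =====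
def Claim_equal_determine_operation_type_py : Prop := ∀ (query : String) (context : Option (List (String × String))), Dom_determine_operation_type_py query context → Spec_determine_operation_type_py query context (determine_operation_type_py query context)

-- ===== LEMMAS AND PROOFS =====

-- B's guarded-min fold over the keyword table, rewritten as the same fold over the
-- list of (containment-test result, rank) pairs (so the tests become abstractable atoms)
theorem pvFoldMap (q : String) (start : Nat) : ∀ (l : List (String × Nat)) (b : Nat),
    l.foldl (fun b kp => if start ≤ kp.2 && kp.2 < b && PySem.Str.isIn kp.1 q then kp.2 else b) b
    = (l.map (fun kp => (PySem.Str.isIn kp.1 q, kp.2))).foldl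
        (fun b kp => if start ≤ kp.2 && kp.2 < b && kp.1 then kp.2 else b) b
  | [], _ => rfl
  | kp :: l, b => by
      simp only [List.map_cons, List.foldl_cons]
      exact pvFoldMap q start l _

-- ===== VERDICT (by name: the statement is the Claim_ definition above) =====
set_option maxHeartbeats 2000000 in
theorem determine_operation_type_py_spec : Claim_equal_determine_operation_type_py := by
  intro query context _
  unfold Spec_determine_operation_type_py determine_operation_type_py determine_operation_type_py_alt
  have hc : pvCtxTruthy context = pvCtxHasImage context := by cases context <;> rfl
  rw [hc]
  simp only [pvKeywordTable, List.any_cons, List.any_nil, Bool.or_false]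
  rw [pvFoldMap]
  simp only [List.map_cons, List.map_nil]
  generalize PySem.Str.isIn "analizza" (PySem.Str.lower query) = a0
  generalize PySem.Str.isIn "descrivi" (PySem.Str.lower query) = a1
  generalize PySem.Str.isIn "cosa vedi" (PySem.Str.lower query) = a2
  generalize PySem.Str.isIn "simili" (PySem.Str.lower query) = s0
  generalize PySem.Str.isIn "trova immagini come" (PySem.Str.lower query) = s1
  generalize PySem.Str.isIn "testo" (PySem.Str.lower query) = t0
  generalize PySem.Str.isIn "ocr" (PySem.Str.lower query) = t1
  generalize PySem.Str.isIn "leggi" (PySem.Str.lower query) = t2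
  generalize PySem.Str.isIn "trova immagini" (PySem.Str.lower query) = d0
  generalize PySem.Str.isIn "cerca foto" (PySem.Str.lower query) = d1
  generalize PySem.Str.isIn "immagini di" (PySem.Str.lower query) = d2
  generalize pvCtxHasImage context = h
  cases h <;> cases a0 <;> cases a1 <;> cases a2 <;> cases s0 <;> cases s1 <;>
    cases t0 <;> cases t1 <;> cases t2 <;> cases d0 <;> cases d1 <;> cases d2 <;> rfl
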